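-- pv_equiv track=rewrite | github.com/ObyBk/RecentAddress | main.py | most_recent_date
-- ===== SOURCE A (Python) =====
-- def most_recent_date(addresses_and_dates):
--     most_recent_dates = {}
--     for address, date_str in addresses_and_dates:
--         date = date_str
--         if address in most_recent_dates:
--             if date > most_recent_dates[address]:
--                 most_recent_dates[address] = date
--         else:
--             most_recent_dates[address] = date
--     return most_recent_dates
-- ===== SOURCE B (Python) =====
-- def most_recent_date(addresses_and_dates):
--     groups = {}
--     for address, date_str in addresses_and_dates:
--         groups.setdefault(address, []).append(date_str)
--     return {address: max(dates) for address, dates in groups.items()}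
-- ===== Notes on version B (the rewrite author's own statement) =====
-- stated objective: alternative
-- what changed: B groups all date strings per address into lists in one pass and then reduces each list with max in a second pass/comprehension, instead of maintaining a running maximum online; key order (first-seen) and values are identical.
import Mathlib
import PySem

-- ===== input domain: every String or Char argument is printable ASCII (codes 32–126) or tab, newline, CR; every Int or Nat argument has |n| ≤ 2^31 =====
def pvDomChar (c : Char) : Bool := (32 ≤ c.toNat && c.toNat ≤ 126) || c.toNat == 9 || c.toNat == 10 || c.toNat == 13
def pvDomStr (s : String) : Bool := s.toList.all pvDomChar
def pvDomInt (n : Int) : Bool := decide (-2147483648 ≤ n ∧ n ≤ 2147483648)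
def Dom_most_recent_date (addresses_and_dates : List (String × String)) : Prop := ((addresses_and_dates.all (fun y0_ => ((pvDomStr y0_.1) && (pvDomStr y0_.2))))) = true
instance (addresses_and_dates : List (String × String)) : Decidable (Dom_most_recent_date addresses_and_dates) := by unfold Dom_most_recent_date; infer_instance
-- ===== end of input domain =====

-- B groups the dates per address in one pass and reduces each group with max in a second
-- pass, instead of A's online running maximum; same return value, alternative decomposition.

-- ===== PORT A =====
def most_recent_date (addresses_and_dates : List (String × String)) : List (String × String) :=
  (addresses_and_dates.foldl
    (fun d p =>
      if d.contains p.1 then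
        if d.getD p.1 "" < p.2 then d.insert p.1 p.2 else d
      else d.insert p.1 p.2)
    PySem.Dict.empty).items

-- ===== PORT B =====
def most_recent_date_alt (addresses_and_dates : List (String × String)) : List (String × String) :=
  ((addresses_and_dates.foldl
      (fun g p => g.modify p.1 [] (fun ds => ds ++ [p.2]))
      PySem.Dict.empty).items).map
    (fun p => (p.1, (PySem.List.max? p.2 (fun x => x)).getD ""))

-- ===== PRECONDITION & SPEC =====
def Spec_most_recent_date (addresses_and_dates : List (String × String)) (out : List (String × String)) : Prop := out = most_recent_date_alt addresses_and_dates
instance (addresses_and_dates : List (String × String)) (out : List (String × String)) : Decidable (Spec_most_recent_date addresses_and_dates out) := by unfold Spec_most_recent_date; infer_instance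

-- ===== CLAIM (what is proved, stated in full; the proofs are below) =====
def Claim_equal_most_recent_date : Prop := ∀ (addresses_and_dates : List (String × String)), Dom_most_recent_date addresses_and_dates → Spec_most_recent_date addresses_and_dates (most_recent_date addresses_and_dates)

-- ===== LEMMAS AND PROOFS =====

-- max(ds) as B's port computes it (with "" for the impossible empty group)
def pvMx (ds : List String) : String := (PySem.List.max? ds (fun x => x)).getD ""

def pvF (p : String × List String) : String × String := (p.1, pvMx p.2)

def pvStepA (d : PySem.Dict String String) (p : String × String) : PySem.Dict String String :=
  if d.contains p.1 then
    if d.getD p.1 "" < p.2 then d.insert p.1 p.2 else d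
  else d.insert p.1 p.2

def pvStepB (g : PySem.Dict String (List String)) (p : String × String) : PySem.Dict String (List String) :=
  g.modify p.1 [] (fun ds => ds ++ [p.2])

-- the lockstep invariant: A's dict is B's group dict with every group reduced by max
def pvRel (d : PySem.Dict String String) (g : PySem.Dict String (List String)) : Prop :=
  d.items = g.items.map pvF ∧ g.keys.Nodup ∧ ∀ q ∈ g.items, q.2 ≠ []

theorem pvRel_get? {d : PySem.Dict String String} {g : PySem.Dict String (List String)}
    (h : pvRel d g) (a : String) : d.get? a = (g.get? a).map pvMx := by
  obtain ⟨hi, -, -⟩ := h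
  simp only [PySem.Dict.get?, hi, List.find?_map]
  have : (fun p => p.1 == a) ∘ pvF = fun (q : String × List String) => q.1 == a := by
    funext q; simp [pvF]
  rw [this]
  cases List.find? (fun (q : String × List String) => q.1 == a) g.items <;> simp [pvF]

theorem pvRel_contains {d : PySem.Dict String String} {g : PySem.Dict String (List String)}
    (h : pvRel d g) (a : String) : d.contains a = g.contains a := by
  rw [PySem.Dict.contains_eq_isSome_get?, PySem.Dict.contains_eq_isSome_get?, pvRel_get? h]
  cases g.get? a <;> rfl

theorem pvMx_cons (x : String) (t : List String) : pvMx (x :: t) = List.foldl max x t := by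
  rw [pvMx, PySem.List.max?_id_cons]; rfl

theorem pvMx_append_singleton (x : String) (t : List String) (v : String) :
    pvMx ((x :: t) ++ [v]) = max (pvMx (x :: t)) v := by
  rw [List.cons_append, pvMx, PySem.List.max?_id_cons, List.foldl_append, pvMx_cons]
  simp

theorem pvRel_step {d : PySem.Dict String String} {g : PySem.Dict String (List String)}
    (h : pvRel d g) (p : String × String) : pvRel (pvStepA d p) (pvStepB g p) := by
  obtain ⟨hi, hnd, hne⟩ := h
  have hc := pvRel_contains ⟨hi, hnd, hne⟩ p.1
  have hstepB : pvStepB g p = g.insert p.1 (g.getD p.1 [] ++ [p.2]) := rfl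
  by_cases hg : g.contains p.1 = true
  · -- the key is already present: both sides overwrite in place
    obtain ⟨ds, hds⟩ : ∃ ds, g.get? p.1 = some ds := by
      rw [PySem.Dict.contains_eq_isSome_get?] at hg
      exact Option.isSome_iff_exists.mp hg
    have hdsne : ds ≠ [] := hne (p.1, ds) (PySem.Dict.mem_items_of_get?_eq_some _ hds)
    have hgetD : g.getD p.1 [] = ds := PySem.Dict.getD_of_get?_eq_some _ _ hds
    have hMx : pvMx (ds ++ [p.2]) = max (pvMx ds) p.2 := by
      obtain ⟨x, t, rfl⟩ := List.exists_cons_of_ne_nil hdsne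
      exact pvMx_append_singleton x t p.2
    have hdget : d.getD p.1 "" = pvMx ds := by
      rw [PySem.Dict.getD_eq_get?_getD, pvRel_get? ⟨hi, hnd, hne⟩ p.1, hds]
      rfl
    have hitems : (pvStepB g p).items
        = g.items.map (fun q => if q.1 == p.1 then (p.1, ds ++ [p.2]) else q) := by
      rw [hstepB, PySem.Dict.items_insert_of_contains _ _ hg, hgetD]
    have hval : ∀ q ∈ g.items, q.1 = p.1 → q.2 = ds := by
      intro q hq hq1
      have h2 := PySem.Dict.get?_of_mem_items (k := q.1) (v := q.2) _ (by simpa using hq) hnd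
      rw [hq1, hds] at h2
      exact (Option.some.inj h2).symm
    refine ⟨?_, ?_, ?_⟩
    · -- items agree after the step
      rw [pvStepA, hc, if_pos hg, hdget, hitems, List.map_map]
      by_cases hlt : pvMx ds < p.2
      · rw [if_pos hlt, PySem.Dict.items_insert_of_contains _ _ (hc ▸ hg), hi, List.map_map]
        refine List.map_congr_left ?_
        intro q hq
        by_cases hq1 : q.1 = p.1
        · have h2 : pvMx (ds ++ [p.2]) = p.2 := by rw [hMx]; exact max_eq_right hlt.le
          simp only [Function.comp_apply, pvF, hq1, beq_self_eq_true, if_true, h2]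
        · simp [Function.comp, pvF, hq1]
      · rw [if_neg hlt, hi]
        refine (List.map_congr_left ?_).symm
        intro q hq
        by_cases hq1 : q.1 = p.1
        · have h2 : pvMx (ds ++ [p.2]) = pvMx ds := by
            rw [hMx]; exact max_eq_left (not_lt.mp hlt)
          have hq2 := hval q hq hq1
          simp only [Function.comp_apply, pvF, hq1, beq_self_eq_true, if_true, h2, hq2]
        · simp [Function.comp, pvF, hq1]
    · rw [hstepB]; exact PySem.Dict.nodup_keys_insert _ _ _ hnd
    · rw [hitems]
      intro q hq
      simp only [List.mem_map] at hq
      obtain ⟨r, hr, hrq⟩ := hq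
      subst hrq
      split
      · simp
      · exact hne r hr
  · -- fresh key: both sides append
    have hg' : g.contains p.1 = false := by simpa using hg
    have hgetD : g.getD p.1 [] = [] := PySem.Dict.getD_of_not_contains _ _ hg'
    have hitems : (pvStepB g p).items = g.items ++ [(p.1, [p.2])] := by
      rw [hstepB, PySem.Dict.items_insert_of_not_contains _ _ hg', hgetD]
      simp
    refine ⟨?_, ?_, ?_⟩
    · rw [pvStepA, hc, if_neg (by simp [hg']),
        PySem.Dict.items_insert_of_not_contains _ _ (by rw [hc]; exact hg'), hi, hitems]
      simp [pvF, pvMx, PySem.List.max?]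
    · rw [hstepB]; exact PySem.Dict.nodup_keys_insert _ _ _ hnd
    · rw [hitems]
      intro q hq
      rcases List.mem_append.mp hq with hq | hq
      · exact hne q hq
      · simp only [List.mem_singleton] at hq; subst hq; simp

theorem pvRel_foldl (l : List (String × String)) :
    ∀ d g, pvRel d g → pvRel (l.foldl pvStepA d) (l.foldl pvStepB g) := by
  induction l with
  | nil => intro d g h; exact h
  | cons p t ih => intro d g h; exact ih _ _ (pvRel_step h p)

-- ===== VERDICT (by name: the statement is the Claim_ definition above) =====
theorem most_recent_date_spec : Claim_equal_most_recent_date := by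
  intro l _
  have h0 : pvRel PySem.Dict.empty PySem.Dict.empty :=
    ⟨by simp [PySem.Dict.empty], by simp [PySem.Dict.empty, PySem.Dict.keys], by simp [PySem.Dict.empty]⟩
  have h := (pvRel_foldl l _ _ h0).1
  show most_recent_date l = most_recent_date_alt l
  unfold most_recent_date most_recent_date_alt
  rw [show (fun (d : PySem.Dict String String) p =>
        if d.contains p.1 = true then
          if d.getD p.1 "" < p.2 then d.insert p.1 p.2 else d
        else d.insert p.1 p.2) = pvStepA from rfl,
      show (fun (g : PySem.Dict String (List String)) (p : String × String) =>
        g.modify p.1 [] (fun ds => ds ++ [p.2])) = pvStepB from rfl, h]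
  rfl
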